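-- pv_equiv track=rewrite | github.com/sth-v/mmodel | utils/utils.py | halfsum
-- ===== SOURCE A (Python) =====
-- def halfsum(lst, halfs=6000):
--     a = [0] * (halfs + 1)
--     a[0] = -1
--     best = halfs + 1
--     for l in lst:
--         for i in range(halfs, l - 1, -1):
--             if (a[i - l] != 0) and a[i] == 0:
--                 a[i] = l
--                 best = min(halfs - i, best)
--     id = halfs - best
--     b = []
--     while (id > 0):
--         b.append(a[id])
--         id = id - a[id]
--     return b
-- ===== SOURCE B (Python) =====
-- def halfsum(lst, halfs=6000):
--     # Forward expansion that carries full solution chains: chains[s] is the list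
--     # of items (in pick order) of the first-found subset summing to s.  The
--     # answer is the chain of the largest reachable sum, reversed -- no value
--     # array and no backtracking reconstruction loop.
--     chains = {0: []}
--     for l in lst:
--         for s, c in list(chains.items()):
--             t = s + l
--             if t <= halfs and t not in chains:
--                 chains[t] = c + [l]
--     return chains[max(chains)][::-1]
-- ===== Notes on version B (the rewrite author's own statement) =====
-- stated objective: alternative
-- what changed: Instead of A's dense backward value-array sweep followed by a backtracking peel loop, B expands reachable sums forward carrying the full solution chain for each sum, so the stored per-sum data is the answer itself and the whole reconstruction phase disappears (the chain of the largest reachable sum is just reversed).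
import Mathlib
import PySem

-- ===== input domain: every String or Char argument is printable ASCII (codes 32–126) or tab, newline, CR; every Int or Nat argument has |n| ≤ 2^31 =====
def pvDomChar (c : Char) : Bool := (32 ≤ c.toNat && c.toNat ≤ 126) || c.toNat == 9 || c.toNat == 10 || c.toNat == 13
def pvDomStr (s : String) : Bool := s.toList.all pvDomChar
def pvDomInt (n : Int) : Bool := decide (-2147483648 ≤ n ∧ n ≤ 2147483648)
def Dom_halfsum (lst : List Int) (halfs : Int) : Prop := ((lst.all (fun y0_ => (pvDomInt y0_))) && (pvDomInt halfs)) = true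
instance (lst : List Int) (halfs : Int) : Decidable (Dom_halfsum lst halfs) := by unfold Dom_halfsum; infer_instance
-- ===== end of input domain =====

-- B replaces A's value-array sweep + backtracking peel loop by a forward expansion that
-- carries the full solution chain for every reachable sum (no reconstruction phase);
-- alternative algorithmic decomposition, not claimed faster.

-- ===== PORT A =====

-- the inner 'for i in range(halfs, l-1, -1)' pass of A, state = (a, best)
def halfsumPass (halfs : Int) (st : List Int × Int) (l : Int) : List Int × Int :=
  (PySem.List.pyRange halfs (l - 1) (-1)).foldl (fun st i =>
    if PySem.List.pyGetD st.1 (i - l) 0 ≠ 0 ∧ PySem.List.pyGetD st.1 i 0 = 0 then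
      (PySem.List.pySetD st.1 i l, min (halfs - i) st.2)
    else st) st

-- A's trailing 'while id > 0' loop; fuel bounds the iteration count (id strictly
-- decreases on every Python iteration inside Pre_, so fuel (halfs+1).toNat suffices)
def halfsumWhile (a : List Int) : Nat → Int → List Int → List Int
  | 0, _, b => b
  | fuel + 1, id, b =>
    if id > 0 then
      halfsumWhile a fuel (id - PySem.List.pyGetD a id 0) (b ++ [PySem.List.pyGetD a id 0])
    else b

def halfsum (lst : List Int) (halfs : Int) : List Int :=
  let a := PySem.List.pySetD (List.replicate (halfs + 1).toNat 0) 0 (-1)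
  let st := lst.foldl (halfsumPass halfs) (a, halfs + 1)
  halfsumWhile st.1 (halfs + 1).toNat (halfs - st.2) []

-- ===== PORT B =====

-- one item of B: 'for s, c in list(chains.items()): if s+l <= halfs and s+l not in chains: chains[s+l] = c + [l]'
def halfsumAltPass (halfs : Int) (chains : PySem.Dict Int (List Int)) (l : Int) : PySem.Dict Int (List Int) :=
  chains.items.foldl (fun out sc =>
    if sc.1 + l ≤ halfs ∧ PySem.Dict.contains out (sc.1 + l) = false then
      PySem.Dict.insert out (sc.1 + l) (sc.2 ++ [l])
    else out) chains

def halfsum_alt (lst : List Int) (halfs : Int) : List Int :=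
  let chains := lst.foldl (halfsumAltPass halfs) (PySem.Dict.insert PySem.Dict.empty 0 [])
  let best := (PySem.List.max? (PySem.Dict.keys chains) (fun x => x)).getD 0
  ((PySem.Dict.get? chains best).getD []).reverse

-- ===== PRECONDITION & SPEC =====
-- Pre_ excludes exactly the inputs on which the Python A raises IndexError:
-- a negative halfs (the value array is empty) or a negative item (a[i-l] indexes past the end).
def Pre_halfsum (lst : List Int) (halfs : Int) : Prop := 0 ≤ halfs ∧ ∀ l ∈ lst, 0 ≤ l
instance (lst : List Int) (halfs : Int) : Decidable (Pre_halfsum lst halfs) := by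
  unfold Pre_halfsum; infer_instance

def pvWitness_halfsum : List Int × Int := ([5, 3, 7, 2], 10)

def Spec_halfsum (lst : List Int) (halfs : Int) (out : List Int) : Prop := out = halfsum_alt lst halfs
instance (lst : List Int) (halfs : Int) (out : List Int) : Decidable (Spec_halfsum lst halfs out) := by
  unfold Spec_halfsum; infer_instance

-- ===== CLAIM (what is proved, stated in full; the proofs are below) =====
def Claim_equal_halfsum : Prop := ∀ (lst : List Int) (halfs : Int), Dom_halfsum lst halfs → Pre_halfsum lst halfs → Spec_halfsum lst halfs (halfsum lst halfs)

-- ===== LEMMAS AND PROOFS =====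

-- the body of A's inner loop, named for the proofs
def passStep (halfs l : Int) (st : List Int × Int) (i : Int) : List Int × Int :=
  if PySem.List.pyGetD st.1 (i - l) 0 ≠ 0 ∧ PySem.List.pyGetD st.1 i 0 = 0 then
    (PySem.List.pySetD st.1 i l, min (halfs - i) st.2)
  else st

theorem halfsumPass_eq (halfs l : Int) (st : List Int × Int) :
    halfsumPass halfs st l = (PySem.List.pyRange halfs (l - 1) (-1)).foldl (passStep halfs l) st := rfl

-- A's update condition at position i, read on a fixed array
def updCond (l : Int) (a : List Int) (i : Int) : Bool :=
  decide (a.getD (i - l).toNat 0 ≠ 0 ∧ a.getD i.toNat 0 = 0)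

theorem pySetD_nonneg (xs : List Int) (i : Int) (v : Int) (h0 : 0 ≤ i)
    (h : i.toNat < xs.length) : PySem.List.pySetD xs i v = xs.set i.toNat v := by
  have hi : i < (xs.length : Int) := by omega
  simp [PySem.List.pySetD, PySem.List.pySet?, PySem.List.pyIdx?, h0, hi]

theorem getD_set_ne (xs : List Int) (m j : Nat) (v : Int) (h : j ≠ m) :
    (xs.set m v).getD j 0 = xs.getD j 0 := by
  simp [List.getD_eq_getElem?_getD, Ne.symm h]

theorem getD_set_self (xs : List Int) (m : Nat) (v : Int) (h : m < xs.length) :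
    (xs.set m v).getD m 0 = v := by
  simp [List.getD_eq_getElem?_getD, h]

-- characterisation of A's inner pass over range(hi, l-1, -1)
theorem passA_go (halfs l : Int) (hl : 0 ≤ l) :
    ∀ (n : Nat) (hi : Int), hi = l - 1 + (n : Int) → ∀ (a : List Int) (best : Int),
    a.length = (halfs + 1).toNat → hi ≤ halfs →
    (((PySem.List.pyRange hi (l - 1) (-1)).foldl (passStep halfs l) (a, best)).1.length = a.length) ∧
    (∀ j : Nat, ((PySem.List.pyRange hi (l - 1) (-1)).foldl (passStep halfs l) (a, best)).1.getD j 0 =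
       if l ≤ (j : Int) ∧ (j : Int) ≤ hi ∧ updCond l a j then l else a.getD j 0) ∧
    (((PySem.List.pyRange hi (l - 1) (-1)).foldl (passStep halfs l) (a, best)).2 =
       ((PySem.List.pyRange hi (l - 1) (-1)).filter (updCond l a)).foldl (fun b i => min (halfs - i) b) best) := by
  intro n
  induction n with
  | zero =>
    intro hi hhi a best hlen hle
    rw [PySem.List.pyRange_neg_one_eq_nil (by omega)]
    refine ⟨rfl, ?_, rfl⟩
    intro j
    rw [if_neg (by rintro ⟨h1, h2, _⟩; omega)]
    rfl
  | succ n ih =>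
    intro hi hhi a best hlen hle
    have hhi0 : 0 ≤ hi := by omega
    have hhil : l ≤ hi := by omega
    have hhiL : hi.toNat < a.length := by omega
    rw [PySem.List.pyRange_neg_one_cons (by omega : l - 1 < hi), List.foldl_cons,
      List.filter_cons]
    have hstep : passStep halfs l (a, best) hi =
        (if updCond l a hi then (a.set hi.toNat l, min (halfs - hi) best) else (a, best)) := by
      unfold passStep updCond
      rw [PySem.List.pyGetD_of_nonneg _ _ (by omega : (0:Int) ≤ hi - l),
          PySem.List.pyGetD_of_nonneg _ _ hhi0]
      by_cases hc : a.getD (hi - l).toNat 0 ≠ 0 ∧ a.getD hi.toNat 0 = 0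
      · rw [if_pos hc, if_pos (by simpa using hc), pySetD_nonneg _ _ _ hhi0 hhiL]
      · rw [if_neg hc, if_neg (by simpa using hc)]
    by_cases hc : updCond l a hi = true
    · rw [hstep, if_pos hc]
      have hlen1 : (a.set hi.toNat l).length = (halfs + 1).toNat := by simpa using hlen
      obtain ⟨L1, F1, B1⟩ := ih (hi - 1) (by omega) (a.set hi.toNat l) (min (halfs - hi) best)
        hlen1 (by omega)
      have hja : ∀ j : Nat, (j : Int) ≠ hi → (a.set hi.toNat l).getD j 0 = a.getD j 0 := by
        intro j hj
        exact getD_set_ne _ _ _ _ (by omega)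
      have hcondI : ∀ i : Int, l ≤ i → i ≤ hi - 1 → updCond l (a.set hi.toNat l) i = updCond l a i := by
        intro i h1 h2
        unfold updCond
        rw [getD_set_ne _ _ _ _ (by omega), getD_set_ne _ _ _ _ (by omega)]
      refine ⟨by rw [L1]; simpa using hlen, ?_, ?_⟩
      · intro j
        rw [F1 j]
        by_cases hj : (j : Int) = hi
        · have hjn : j = hi.toNat := by omega
          rw [if_neg (by rintro ⟨_, h2, _⟩; omega), if_pos ⟨by omega, by omega, by rw [hj]; exact hc⟩]
          rw [hjn]
          exact getD_set_self _ _ _ hhiL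
        · by_cases hj2 : (j : Int) < hi
          · by_cases hlj : l ≤ (j : Int)
            · rw [hcondI _ hlj (by omega), hja j hj]
              exact if_congr ⟨fun ⟨x, y, z⟩ => ⟨x, by omega, z⟩, fun ⟨x, y, z⟩ => ⟨x, by omega, z⟩⟩ rfl rfl
            · rw [if_neg (by rintro ⟨h1, _, _⟩; omega), if_neg (by rintro ⟨h1, _, _⟩; omega)]
              exact hja j hj
          · rw [if_neg (by rintro ⟨_, h2, _⟩; omega), if_neg (by rintro ⟨_, h2, _⟩; omega)]
            exact hja j hj
      · rw [B1]
        have hfe : (PySem.List.pyRange (hi - 1) (l - 1) (-1)).filter (updCond l (a.set hi.toNat l)) =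
            (PySem.List.pyRange (hi - 1) (l - 1) (-1)).filter (updCond l a) := by
          apply List.filter_congr
          intro i hi2
          rw [PySem.List.mem_pyRange_neg_one] at hi2
          rw [hcondI i (by omega) (by omega)]
        rw [hfe, if_pos hc, List.foldl_cons]
    · rw [hstep, if_neg hc]
      obtain ⟨L1, F1, B1⟩ := ih (hi - 1) (by omega) a best hlen (by omega)
      refine ⟨L1, ?_, ?_⟩
      · intro j
        rw [F1 j]
        by_cases hj : (j : Int) = hi
        · rw [if_neg (by rintro ⟨_, h2, _⟩; omega), if_neg]
          rintro ⟨_, _, hu⟩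
          rw [show ((j : Int)) = hi from hj] at hu
          exact hc hu
        · exact if_congr ⟨fun ⟨x, y, z⟩ => ⟨x, by omega, z⟩, fun ⟨x, y, z⟩ => ⟨x, by omega, z⟩⟩ rfl rfl
      · rw [B1, if_neg (by simpa using hc)]

theorem minfold_le (halfs : Int) : ∀ (xs : List Int) (b0 : Int),
    xs.foldl (fun b i => min (halfs - i) b) b0 ≤ b0 ∧
    ∀ i ∈ xs, xs.foldl (fun b i => min (halfs - i) b) b0 ≤ halfs - i := by
  intro xs
  induction xs with
  | nil => intro b0; simp
  | cons x t ih =>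
    intro b0
    obtain ⟨h1, h2⟩ := ih (min (halfs - x) b0)
    refine ⟨le_trans h1 (by simp), ?_⟩
    intro i hi
    rcases List.mem_cons.mp hi with rfl | hi
    · exact le_trans h1 (by simp)
    · exact h2 i hi

theorem minfold_cases (halfs : Int) : ∀ (xs : List Int) (b0 : Int),
    xs.foldl (fun b i => min (halfs - i) b) b0 = b0 ∨
    ∃ i ∈ xs, xs.foldl (fun b i => min (halfs - i) b) b0 = halfs - i := by
  intro xs
  induction xs with
  | nil => intro b0; simp
  | cons x t ih =>
    intro b0
    simp only [List.foldl_cons]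
    rcases ih (min (halfs - x) b0) with h | ⟨i, hi, h⟩
    · rcases min_cases (halfs - x) b0 with ⟨he, _⟩ | ⟨he, _⟩
      · exact Or.inr ⟨x, List.mem_cons_self, by rw [h, he]⟩
      · exact Or.inl (by rw [h, he])
    · exact Or.inr ⟨i, List.mem_cons_of_mem _ hi, h⟩

-- ---------- B-side characterisation ----------

-- the body of B's inner loop, named for the proofs
def altStep (halfs l : Int) (out : PySem.Dict Int (List Int)) (sc : Int × List Int) :
    PySem.Dict Int (List Int) :=
  if sc.1 + l ≤ halfs ∧ PySem.Dict.contains out (sc.1 + l) = false then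
    PySem.Dict.insert out (sc.1 + l) (sc.2 ++ [l])
  else out

theorem halfsumAltPass_eq (halfs : Int) (ch : PySem.Dict Int (List Int)) (l : Int) :
    halfsumAltPass halfs ch l = ch.items.foldl (altStep halfs l) ch := rfl

-- sums newly reachable through item l
abbrev AddCond (halfs l : Int) (ch : PySem.Dict Int (List Int)) (j : Int) : Prop :=
  PySem.Dict.contains ch (j - l) = true ∧ j ≤ halfs ∧ PySem.Dict.contains ch j = false

theorem passB_go (halfs l : Int) (ch : PySem.Dict Int (List Int)) :
    ∀ (ps : List (Int × List Int)) (out : PySem.Dict Int (List Int)),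
    (ps.map Prod.fst).Nodup →
    (∀ p ∈ ps, ch.get? p.1 = some p.2) →
    (∀ p ∈ ps, PySem.Dict.contains out (p.1 + l) = PySem.Dict.contains ch (p.1 + l)) →
    ∀ j, (ps.foldl (altStep halfs l) out).get? j =
      if (∃ p ∈ ps, j = p.1 + l) ∧ j ≤ halfs ∧ PySem.Dict.contains ch j = false
      then (ch.get? (j - l)).map (fun c => c ++ [l])
      else out.get? j := by
  intro ps
  induction ps with
  | nil =>
    intro out _ _ _ j
    rw [if_neg (by rintro ⟨⟨p, hp, _⟩, _, _⟩; simp at hp)]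
    rfl
  | cons p t ih =>
    intro out hnd hsrc hcon j
    have hndt : (t.map Prod.fst).Nodup := (List.nodup_cons.mp hnd).2
    have hpt : p.1 ∉ t.map Prod.fst := (List.nodup_cons.mp hnd).1
    have hstep : altStep halfs l out p =
        if p.1 + l ≤ halfs ∧ PySem.Dict.contains ch (p.1 + l) = false then
          PySem.Dict.insert out (p.1 + l) (p.2 ++ [l]) else out := by
      unfold altStep
      rw [hcon p List.mem_cons_self]
    simp only [List.foldl_cons]
    by_cases hc : p.1 + l ≤ halfs ∧ PySem.Dict.contains ch (p.1 + l) = false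
    · rw [hstep, if_pos hc]
      have hcon' : ∀ q ∈ t, PySem.Dict.contains (PySem.Dict.insert out (p.1 + l) (p.2 ++ [l])) (q.1 + l)
          = PySem.Dict.contains ch (q.1 + l) := by
        intro q hq
        rw [PySem.Dict.contains_insert]
        have hne : q.1 ≠ p.1 := by
          intro he
          exact hpt (List.mem_map.mpr ⟨q, hq, he⟩)
        have : (q.1 + l == p.1 + l) = false := by
          simp only [beq_eq_false_iff_ne, ne_eq]
          omega
        rw [this, Bool.false_or]
        exact hcon q (List.mem_cons_of_mem _ hq)
      rw [ih _ hndt (fun q hq => hsrc q (List.mem_cons_of_mem _ hq)) hcon' j]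
      by_cases hj : j = p.1 + l
      · have hnt : ¬ (∃ q ∈ t, j = q.1 + l) := by
          rintro ⟨q, hq, he⟩
          exact hpt (List.mem_map.mpr ⟨q, hq, by omega⟩)
        rw [if_neg (by rintro ⟨he, _, _⟩; exact hnt he),
          if_pos ⟨⟨p, List.mem_cons_self, hj⟩, by rw [hj]; exact hc.1, by rw [hj]; exact hc.2⟩]
        have : j - l = p.1 := by omega
        rw [this, hsrc p List.mem_cons_self, hj, PySem.Dict.get?_insert_self]
        rfl
      · have hiff : ((∃ q ∈ t, j = q.1 + l) ∧ j ≤ halfs ∧ PySem.Dict.contains ch j = false) ↔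
            ((∃ q ∈ p :: t, j = q.1 + l) ∧ j ≤ halfs ∧ PySem.Dict.contains ch j = false) := by
          constructor
          · rintro ⟨⟨q, hq, he⟩, h2, h3⟩
            exact ⟨⟨q, List.mem_cons_of_mem _ hq, he⟩, h2, h3⟩
          · rintro ⟨⟨q, hq, he⟩, h2, h3⟩
            rcases List.mem_cons.mp hq with rfl | hq
            · exact absurd he hj
            · exact ⟨⟨q, hq, he⟩, h2, h3⟩
        rw [if_congr hiff rfl rfl]
        by_cases hcond : (∃ q ∈ p :: t, j = q.1 + l) ∧ j ≤ halfs ∧ PySem.Dict.contains ch j = false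
        · rw [if_pos hcond, if_pos hcond]
        · rw [if_neg hcond, if_neg hcond, PySem.Dict.get?_insert_of_ne _ _ hj]
    · rw [hstep, if_neg hc]
      rw [ih _ hndt (fun q hq => hsrc q (List.mem_cons_of_mem _ hq))
        (fun q hq => hcon q (List.mem_cons_of_mem _ hq)) j]
      have hiff : ((∃ q ∈ t, j = q.1 + l) ∧ j ≤ halfs ∧ PySem.Dict.contains ch j = false) ↔
          ((∃ q ∈ p :: t, j = q.1 + l) ∧ j ≤ halfs ∧ PySem.Dict.contains ch j = false) := by
        constructor
        · rintro ⟨⟨q, hq, he⟩, h2, h3⟩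
          exact ⟨⟨q, List.mem_cons_of_mem _ hq, he⟩, h2, h3⟩
        · rintro ⟨⟨q, hq, he⟩, h2, h3⟩
          rcases List.mem_cons.mp hq with rfl | hq
          · exact absurd ⟨by rw [← he]; exact h2, by rw [← he]; exact h3⟩ hc
          · exact ⟨⟨q, hq, he⟩, h2, h3⟩
      rw [if_congr hiff rfl rfl]

theorem passB_get? (halfs l : Int) (ch : PySem.Dict Int (List Int)) (hnd : ch.keys.Nodup) (j : Int) :
    (halfsumAltPass halfs ch l).get? j =
      if AddCond halfs l ch j then (ch.get? (j - l)).map (fun c => c ++ [l]) else ch.get? j := by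
  have hk : ch.items.map Prod.fst = ch.keys := rfl
  have h := passB_go halfs l ch ch.items ch (by rw [hk]; exact hnd)
    (fun p hp => PySem.Dict.get?_of_mem_items ch (by simpa using hp) hnd)
    (fun _ _ => rfl) j
  rw [halfsumAltPass_eq, h]
  have hiff : ((∃ p ∈ ch.items, j = p.1 + l) ∧ j ≤ halfs ∧ PySem.Dict.contains ch j = false) ↔
      AddCond halfs l ch j := by
    unfold AddCond
    constructor
    · rintro ⟨⟨p, hp, he⟩, h2, h3⟩
      refine ⟨?_, h2, h3⟩
      rw [PySem.Dict.contains_iff_mem_keys]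
      have : j - l = p.1 := by omega
      rw [this, ← hk]
      exact List.mem_map.mpr ⟨p, hp, rfl⟩
    · rintro ⟨h1, h2, h3⟩
      refine ⟨?_, h2, h3⟩
      rw [PySem.Dict.contains_iff_mem_keys, ← hk] at h1
      obtain ⟨p, hp, he⟩ := List.mem_map.mp h1
      exact ⟨p, hp, by omega⟩
  rw [if_congr hiff rfl rfl]

theorem passB_contains (halfs l : Int) (ch : PySem.Dict Int (List Int)) (hnd : ch.keys.Nodup) (j : Int) :
    PySem.Dict.contains (halfsumAltPass halfs ch l) j = true ↔
      (AddCond halfs l ch j ∨ PySem.Dict.contains ch j = true) := by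
  have hcg : ∀ (d : PySem.Dict Int (List Int)) (k : Int),
      PySem.Dict.contains d k = true ↔ d.get? k ≠ none := by
    intro d k
    rw [Ne, PySem.Dict.get?_eq_none_iff_contains]
    simp
  rw [hcg, passB_get? halfs l ch hnd j]
  by_cases hA : AddCond halfs l ch j
  · rw [if_pos hA]
    have h1 : ch.get? (j - l) ≠ none := by
      rw [Ne, PySem.Dict.get?_eq_none_iff_contains, hA.1]
      simp
    cases hg : ch.get? (j - l) with
    | none => exact absurd hg h1
    | some c =>
      refine ⟨fun _ => Or.inl hA, fun _ => ?_⟩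
      simp
  · rw [if_neg hA, ← hcg]
    tauto

theorem passB_nodup (halfs l : Int) (ch : PySem.Dict Int (List Int)) (hnd : ch.keys.Nodup) :
    (halfsumAltPass halfs ch l).keys.Nodup := by
  rw [halfsumAltPass_eq]
  have : ∀ (ps : List (Int × List Int)) (out : PySem.Dict Int (List Int)), out.keys.Nodup →
      (ps.foldl (altStep halfs l) out).keys.Nodup := by
    intro ps
    induction ps with
    | nil => intro out h; exact h
    | cons p t ih =>
      intro out h
      simp only [List.foldl_cons]
      apply ih
      unfold altStep
      split
      · exact PySem.Dict.nodup_keys_insert _ _ _ h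
      · exact h
  exact this ch.items ch hnd

-- ---------- the simulation invariant ----------

def ChainInv (halfs : Int) (a : List Int) (best : Int) (ch : PySem.Dict Int (List Int)) : Prop :=
  a.length = (halfs + 1).toNat ∧
  a.getD 0 0 = -1 ∧
  (∀ j : Int, 0 < j → j ≤ halfs → a.getD j.toNat 0 = 0 ∨ (1 ≤ a.getD j.toNat 0 ∧ a.getD j.toNat 0 ≤ j)) ∧
  ch.get? 0 = some [] ∧
  (∀ j : Int, PySem.Dict.contains ch j = true ↔ (j = 0 ∨ (0 < j ∧ j ≤ halfs ∧ a.getD j.toNat 0 ≠ 0))) ∧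
  (∀ j : Int, 0 < j → j ≤ halfs → a.getD j.toNat 0 ≠ 0 →
     ∃ c, ch.get? (j - a.getD j.toNat 0) = some c ∧ ch.get? j = some (c ++ [a.getD j.toNat 0])) ∧
  ch.keys.Nodup ∧
  ((best = halfs + 1 ∧ ∀ k ∈ ch.keys, k ≤ 0) ∨
   (∃ m ∈ ch.keys, 0 < m ∧ best = halfs - m ∧ ∀ k ∈ ch.keys, k ≤ m))

-- the bridge: B's add condition is exactly A's update condition
theorem bridge (halfs l : Int) (hl : 0 ≤ l) (a : List Int) (best : Int)
    (ch : PySem.Dict Int (List Int)) (h : ChainInv halfs a best ch) (j : Int) :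
    AddCond halfs l ch j ↔ (l ≤ j ∧ j ≤ halfs ∧ updCond l a j = true) := by
  obtain ⟨hlen, ha0, hval, hget0, hdom, hchain, hnd, hbest⟩ := h
  unfold AddCond updCond
  rw [decide_eq_true_eq]
  constructor
  · rintro ⟨h1, h2, h3⟩
    rw [hdom (j - l)] at h1
    have h3' : ¬ (j = 0 ∨ (0 < j ∧ j ≤ halfs ∧ a.getD j.toNat 0 ≠ 0)) := by
      intro hcon
      rw [(hdom j).mpr hcon] at h3
      simp at h3
    push_neg at h3'
    obtain ⟨hj0, h3''⟩ := h3'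
    have hlj : l ≤ j := by
      rcases h1 with he | ⟨hp, _, _⟩ <;> omega
    have hjpos : 0 < j := by omega
    refine ⟨hlj, h2, ?_, h3'' hjpos h2⟩
    rcases h1 with he | ⟨_, _, hne⟩
    · have e0 : (j - l).toNat = 0 := by omega
      rw [e0, ha0]; omega
    · exact hne
  · rintro ⟨h1, h2, h3, h4⟩
    have hjpos : 0 < j := by
      by_contra hn
      have hj0 : j = 0 := by omega
      rw [hj0] at h4
      simp only [Int.toNat_zero] at h4
      rw [ha0] at h4
      omega
    refine ⟨?_, h2, ?_⟩
    · rw [hdom (j - l)]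
      by_cases hd : j - l = 0
      · exact Or.inl hd
      · exact Or.inr ⟨by omega, by omega, h3⟩
    · cases hc : PySem.Dict.contains ch j
      · rfl
      · exfalso
        rcases (hdom j).mp hc with he | ⟨_, _, hne⟩
        · omega
        · exact hne h4

-- updCond forces l ≥ 1 (an l = 0 item never updates anything)
theorem updCond_pos (l : Int) (a : List Int) (j : Int) (hu : updCond l a j = true) : 1 ≤ l ∨ l < 0 := by
  by_contra hn
  push_neg at hn
  have hl0 : l = 0 := by omega
  unfold updCond at hu
  rw [decide_eq_true_eq, hl0] at hu
  simp only [sub_zero] at hu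
  exact hu.1 hu.2

theorem step_inv (halfs l : Int) (hl : 0 ≤ l)
    (a : List Int) (best : Int) (ch : PySem.Dict Int (List Int)) (h : ChainInv halfs a best ch) :
    ChainInv halfs (halfsumPass halfs (a, best) l).1 (halfsumPass halfs (a, best) l).2
      (halfsumAltPass halfs ch l) := by
  have hbr := bridge halfs l hl a best ch h
  obtain ⟨hlen, ha0, hval, hget0, hdom, hchain, hnd, hbest⟩ := h
  have hB := passB_get? halfs l ch hnd
  have hBc := passB_contains halfs l ch hnd
  have hBnd := passB_nodup halfs l ch hnd
  have hkeysB : ∀ k : Int, k ∈ (halfsumAltPass halfs ch l).keys ↔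
      (AddCond halfs l ch k ∨ k ∈ ch.keys) := by
    intro k
    rw [← PySem.Dict.contains_iff_mem_keys, hBc k, PySem.Dict.contains_iff_mem_keys]
  have hgetsome : ∀ k : Int, PySem.Dict.contains ch k = true → ∃ c, ch.get? k = some c := by
    intro k hk
    cases hg : ch.get? k with
    | none =>
      rw [PySem.Dict.get?_eq_none_iff_contains] at hg
      rw [hk] at hg
      exact absurd hg (by simp)
    | some c => exact ⟨c, rfl⟩
  by_cases hlh : l ≤ halfs + 1
  case neg =>
    -- l > halfs + 1 : A's range is empty and B adds nothing
    have hA : halfsumPass halfs (a, best) l = (a, best) := by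
      rw [halfsumPass_eq, PySem.List.pyRange_neg_one_eq_nil (by omega)]
      rfl
    have hnoadd : ∀ j : Int, ¬ AddCond halfs l ch j := by
      intro j hj
      rw [hbr j] at hj
      omega
    have hBeq : ∀ j : Int, (halfsumAltPass halfs ch l).get? j = ch.get? j := by
      intro j
      rw [hB j, if_neg (hnoadd j)]
    rw [hA]
    refine ⟨hlen, ha0, hval, by rw [hBeq 0]; exact hget0, ?_, ?_, hBnd, ?_⟩
    · intro j
      rw [hBc j, hdom j]
      constructor
      · rintro (hadd | hh)
        · exact absurd hadd (hnoadd j)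
        · exact hh
      · exact Or.inr
    · intro j h1 h2 h3
      obtain ⟨c, hc1, hc2⟩ := hchain j h1 h2 h3
      exact ⟨c, by rw [hBeq]; exact hc1, by rw [hBeq]; exact hc2⟩
    · rcases hbest with ⟨hb1, hb⟩ | ⟨m, hm, hm0, hbe, hub⟩
      · refine Or.inl ⟨hb1, ?_⟩
        intro k hk
        rcases (hkeysB k).mp hk with hadd | hk'
        · exact absurd hadd (hnoadd k)
        · exact hb k hk'
      · refine Or.inr ⟨m, (hkeysB m).mpr (Or.inr hm), hm0, hbe, ?_⟩
        intro k hk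
        rcases (hkeysB k).mp hk with hadd | hk'
        · exact absurd hadd (hnoadd k)
        · exact hub k hk'
  case pos =>
    obtain ⟨L1, F1, B1⟩ := passA_go halfs l hl ((halfs - l + 1).toNat) halfs (by omega) a best hlen le_rfl
    rw [halfsumPass_eq]
    have hA1get : ∀ j : Int, 0 ≤ j →
        (List.foldl (passStep halfs l) (a, best) (PySem.List.pyRange halfs (l - 1) (-1))).1.getD j.toNat 0 =
          if l ≤ j ∧ j ≤ halfs ∧ updCond l a j = true then l else a.getD j.toNat 0 := by
      intro j hj
      have := F1 j.toNat
      rwa [Int.toNat_of_nonneg hj] at this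
    have hupd1 : ∀ j : Int, updCond l a j = true → 1 ≤ l := by
      intro j hu
      rcases updCond_pos l a j hu with h | h
      · exact h
      · omega
    refine ⟨by rw [L1, hlen], ?_, ?_, ?_, ?_, ?_, hBnd, ?_⟩
    · -- a'[0] = -1
      have h00 := hA1get 0 le_rfl
      rw [if_neg] at h00
      · simp only [Int.toNat_zero] at h00
        rw [h00]; exact ha0
      · rintro ⟨_, _, hu⟩
        unfold updCond at hu
        rw [decide_eq_true_eq] at hu
        have h2 := hu.2
        simp only [Int.toNat_zero] at h2
        omega
    · -- value range
      intro j h1 h2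
      rw [hA1get j (by omega)]
      by_cases hc : l ≤ j ∧ j ≤ halfs ∧ updCond l a j = true
      · rw [if_pos hc]
        exact Or.inr ⟨hupd1 j hc.2.2, hc.1⟩
      · rw [if_neg hc]
        exact hval j h1 h2
    · -- ch'.get? 0 = some []
      rw [hB 0, if_neg]
      · exact hget0
      rintro ⟨_, _, hcon⟩
      have h00 : PySem.Dict.contains ch 0 = true := (hdom 0).mpr (Or.inl rfl)
      rw [h00] at hcon
      simp at hcon
    · -- contains characterisation against the new array
      intro j
      rw [hBc j, hdom j, hbr j]
      by_cases hc : l ≤ j ∧ j ≤ halfs ∧ updCond l a j = true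
      · have hjpos : 0 < j := by
          have h1l := hupd1 j hc.2.2
          omega
        have hv : (List.foldl (passStep halfs l) (a, best) (PySem.List.pyRange halfs (l - 1) (-1))).1.getD j.toNat 0 = l := by
          rw [hA1get j (by omega), if_pos hc]
        constructor
        · intro _
          right
          refine ⟨hjpos, hc.2.1, ?_⟩
          rw [hv]
          have := hupd1 j hc.2.2
          omega
        · intro _
          exact Or.inl hc
      · have hv : ∀ h0 : 0 ≤ j, (List.foldl (passStep halfs l) (a, best) (PySem.List.pyRange halfs (l - 1) (-1))).1.getD j.toNat 0 = a.getD j.toNat 0 := by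
          intro h0
          rw [hA1get j h0, if_neg hc]
        constructor
        · rintro (hcc | hh)
          · exact absurd hcc hc
          · rcases hh with he | ⟨h1, h2, h3⟩
            · exact Or.inl he
            · exact Or.inr ⟨h1, h2, by rw [hv (by omega)]; exact h3⟩
        · rintro (he | ⟨h1, h2, h3⟩)
          · exact Or.inr (Or.inl he)
          · rw [hv (by omega)] at h3
            exact Or.inr (Or.inr ⟨h1, h2, h3⟩)
    · -- the chain clause
      intro j h1 h2 h3
      by_cases hc : l ≤ j ∧ j ≤ halfs ∧ updCond l a j = true
      · -- newly added: a'[j] = l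
        have hv : (List.foldl (passStep halfs l) (a, best) (PySem.List.pyRange halfs (l - 1) (-1))).1.getD j.toNat 0 = l := by
          rw [hA1get j (by omega), if_pos hc]
        have hAdd : AddCond halfs l ch j := (hbr j).mpr hc
        obtain ⟨hc1, hc2, hc3⟩ := hAdd
        obtain ⟨c, hcget⟩ := hgetsome (j - l) hc1
        refine ⟨c, ?_, ?_⟩
        · rw [hv, hB (j - l), if_neg]
          · exact hcget
          rintro ⟨_, _, hcc⟩
          rw [hc1] at hcc
          simp at hcc
        · rw [hv, hB j, if_pos ⟨hc1, hc2, hc3⟩, hcget]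
          rfl
      · -- old entry: a'[j] = a[j]
        have hv : (List.foldl (passStep halfs l) (a, best) (PySem.List.pyRange halfs (l - 1) (-1))).1.getD j.toNat 0 = a.getD j.toNat 0 := by
          rw [hA1get j (by omega), if_neg hc]
        rw [hv] at h3 ⊢
        obtain ⟨c, hg1, hg2⟩ := hchain j h1 h2 h3
        have hcj : PySem.Dict.contains ch j = true := (hdom j).mpr (Or.inr ⟨h1, h2, h3⟩)
        have hcjl : PySem.Dict.contains ch (j - a.getD j.toNat 0) = true := by
          cases hcc : PySem.Dict.contains ch (j - a.getD j.toNat 0)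
          · exfalso
            rw [← PySem.Dict.get?_eq_none_iff_contains] at hcc
            rw [hcc] at hg1
            exact Option.some_ne_none c hg1.symm
          · rfl
        refine ⟨c, ?_, ?_⟩
        · rw [hB (j - a.getD j.toNat 0), if_neg]
          · exact hg1
          rintro ⟨_, _, hcc⟩
          rw [hcjl] at hcc
          simp at hcc
        · rw [hB j, if_neg]
          · exact hg2
          rintro ⟨_, _, hcc⟩
          rw [hcj] at hcc
          simp at hcc
    · -- the best relation
      rw [B1]
      set fl := (PySem.List.pyRange halfs (l - 1) (-1)).filter (updCond l a) with hfl_def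
      have hflmem : ∀ i : Int, i ∈ fl ↔ (l ≤ i ∧ i ≤ halfs ∧ updCond l a i = true) := by
        intro i
        rw [hfl_def, List.mem_filter, PySem.List.mem_pyRange_neg_one]
        constructor
        · rintro ⟨⟨h1, h2⟩, h3⟩; exact ⟨by omega, h2, h3⟩
        · rintro ⟨h1, h2, h3⟩; exact ⟨⟨by omega, h2⟩, h3⟩
      have hfladd : ∀ i : Int, i ∈ fl ↔ AddCond halfs l ch i := by
        intro i
        rw [hflmem, hbr]
      have hpos : ∀ i ∈ fl, 0 < i := by
        intro i hi
        obtain ⟨hh1, _, hh3⟩ := (hflmem i).mp hi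
        have := hupd1 i hh3
        omega
      by_cases hfl : fl = []
      · rw [hfl]
        simp only [List.foldl_nil]
        have hnoadd : ∀ k : Int, ¬ AddCond halfs l ch k := by
          intro k hk
          rw [← hfladd k, hfl] at hk
          simp at hk
        rcases hbest with ⟨he, hb⟩ | ⟨m, hm, hm0, hbe, hub⟩
        · refine Or.inl ⟨he, ?_⟩
          intro k hk
          rcases (hkeysB k).mp hk with hadd | hk'
          · exact absurd hadd (hnoadd k)
          · exact hb k hk'
        · refine Or.inr ⟨m, (hkeysB m).mpr (Or.inr hm), hm0, hbe, ?_⟩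
          intro k hk
          rcases (hkeysB k).mp hk with hadd | hk'
          · exact absurd hadd (hnoadd k)
          · exact hub k hk'
      · obtain ⟨i0, hi0⟩ := List.exists_mem_of_ne_nil fl hfl
        obtain ⟨hle1, hle2⟩ := minfold_le halfs fl best
        rcases minfold_cases halfs fl best with he | ⟨i, hifl, he⟩
        · rcases hbest with ⟨hb1, hb⟩ | ⟨m, hm, hm0, hbe, hub⟩
          · exfalso
            have hx1 := hle2 i0 hi0
            have hx2 := hpos i0 hi0
            omega
          · refine Or.inr ⟨m, (hkeysB m).mpr (Or.inr hm), hm0, by rw [he, hbe], ?_⟩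
            intro k hk
            rcases (hkeysB k).mp hk with hadd | hk'
            · have := hle2 k ((hfladd k).mpr hadd)
              omega
            · exact hub k hk'
        · refine Or.inr ⟨i, (hkeysB i).mpr (Or.inl ((hfladd i).mp hifl)), hpos i hifl, he, ?_⟩
          intro k hk
          rcases (hkeysB k).mp hk with hadd | hk'
          · have := hle2 k ((hfladd k).mpr hadd)
            omega
          · rcases hbest with ⟨hb1, hb⟩ | ⟨m, hm, hm0, hbe, hub⟩
            · have := hb k hk'
              have := hpos i hifl
              omega
            · have := hub k hk'
              omega

theorem init_inv (halfs : Int) (h0 : 0 ≤ halfs) :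
    ChainInv halfs (PySem.List.pySetD (List.replicate (halfs + 1).toNat 0) 0 (-1)) (halfs + 1)
      (PySem.Dict.insert PySem.Dict.empty 0 []) := by
  have hL : 0 < (halfs + 1).toNat := by omega
  have ha : PySem.List.pySetD (List.replicate (halfs + 1).toNat (0 : Int)) 0 (-1)
      = (List.replicate (halfs + 1).toNat (0 : Int)).set 0 (-1) := by
    apply pySetD_nonneg _ _ _ le_rfl
    simpa using hL
  have hrep : ∀ j : Nat, (List.replicate (halfs + 1).toNat (0 : Int)).getD j 0 = 0 := by
    intro j
    simp [List.getD_eq_getElem?_getD, List.getElem?_replicate]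
    split <;> rfl
  have haj : ∀ j : Int, 0 < j → ((List.replicate (halfs + 1).toNat (0 : Int)).set 0 (-1)).getD j.toNat 0 = 0 := by
    intro j hj
    rw [getD_set_ne _ _ _ _ (by omega), hrep]
  have hkeys : (PySem.Dict.insert (PySem.Dict.empty (κ := Int) (ν := List Int)) 0 []).keys = [0] := by
    rw [PySem.Dict.keys_insert_of_not_contains _ _ (PySem.Dict.contains_empty _), PySem.Dict.keys_empty]
    rfl
  refine ⟨by simp [ha], by rw [ha]; exact getD_set_self _ _ _ (by simpa using hL), ?_, ?_, ?_, ?_, ?_, ?_⟩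
  · intro j h1 _
    left
    rw [ha]
    exact haj j h1
  · exact PySem.Dict.get?_insert_self _ _ _
  · intro j
    rw [PySem.Dict.contains_insert, PySem.Dict.contains_empty, Bool.or_false, beq_iff_eq]
    constructor
    · intro hj
      exact Or.inl hj
    · rintro (hj | ⟨h1, _, h3⟩)
      · exact hj
      · exfalso
        rw [ha] at h3
        exact h3 (haj j h1)
  · intro j h1 _ h3
    exfalso
    rw [ha] at h3
    exact h3 (haj j h1)
  · rw [hkeys]
    exact List.nodup_singleton 0
  · left
    refine ⟨rfl, ?_⟩
    intro k hk
    rw [hkeys] at hk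
    simp at hk
    omega

theorem fold_inv (halfs : Int) :
    ∀ (lst : List Int) (a : List Int) (best : Int) (ch : PySem.Dict Int (List Int)),
    (∀ l ∈ lst, 0 ≤ l) → ChainInv halfs a best ch →
    ChainInv halfs (lst.foldl (halfsumPass halfs) (a, best)).1 (lst.foldl (halfsumPass halfs) (a, best)).2
      (lst.foldl (halfsumAltPass halfs) ch) := by
  intro lst
  induction lst with
  | nil => intro a best ch _ h; exact h
  | cons l t ih =>
    intro a best ch hall h
    simp only [List.foldl_cons]
    have hstep := step_inv halfs l (hall l List.mem_cons_self) a best ch h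
    have := ih (halfsumPass halfs (a, best) l).1 (halfsumPass halfs (a, best) l).2
      (halfsumAltPass halfs ch l) (fun x hx => hall x (List.mem_cons_of_mem _ hx)) hstep
    simpa using this

theorem whileA_nonpos (a : List Int) (fuel : Nat) (id : Int) (b : List Int) (h : id ≤ 0) :
    halfsumWhile a fuel id b = b := by
  cases fuel with
  | zero => rfl
  | succ f => simp only [halfsumWhile]; rw [if_neg (by omega)]

-- peeling A's while loop produces the reverse of B's stored chain
theorem while_peel (halfs : Int) (a : List Int) (best : Int) (ch : PySem.Dict Int (List Int))
    (hinv : ChainInv halfs a best ch) :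
    ∀ (fuel : Nat) (s : Int) (c b : List Int), 0 ≤ s → s ≤ halfs → s.toNat ≤ fuel →
    ch.get? s = some c → halfsumWhile a fuel s b = b ++ c.reverse := by
  obtain ⟨hlen, ha0, hval, hget0, hdom, hchain, hnd, hbest⟩ := hinv
  intro fuel
  induction fuel with
  | zero =>
    intro s c b h0 hh hf hg
    have hs0 : s = 0 := by omega
    rw [hs0] at hg
    rw [hget0] at hg
    have hc : c = [] := (Option.some_inj.mp hg).symm
    rw [hc, hs0, whileA_nonpos _ _ _ _ le_rfl]
    simp
  | succ f ih =>
    intro s c b h0 hh hf hg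
    by_cases hs : 0 < s
    · have hcon : PySem.Dict.contains ch s = true := by
        cases hcc : PySem.Dict.contains ch s
        · exfalso
          rw [← PySem.Dict.get?_eq_none_iff_contains] at hcc
          rw [hcc] at hg
          exact Option.some_ne_none c hg.symm
        · rfl
      have hne : a.getD s.toNat 0 ≠ 0 := by
        rcases (hdom s).mp hcon with he | ⟨_, _, h3⟩
        · omega
        · exact h3
      obtain ⟨c0, hg1, hg2⟩ := hchain s hs hh hne
      have hcc : c = c0 ++ [a.getD s.toNat 0] :=
        Option.some_inj.mp (hg.symm.trans hg2)
      have hrange : 1 ≤ a.getD s.toNat 0 ∧ a.getD s.toNat 0 ≤ s := by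
        rcases hval s hs hh with h | h
        · exact absurd h hne
        · exact h
      simp only [halfsumWhile]
      rw [if_pos (by omega), PySem.List.pyGetD_of_nonneg _ _ h0]
      rw [ih (s - a.getD s.toNat 0) c0 (b ++ [a.getD s.toNat 0]) (by omega) (by omega) (by omega) hg1]
      rw [hcc]
      simp
    · have hs0 : s = 0 := by omega
      rw [hs0] at hg
      rw [hget0] at hg
      have hc : c = [] := (Option.some_inj.mp hg).symm
      rw [hc, hs0]
      simp only [halfsumWhile]
      rw [if_neg (by omega)]
      simp

theorem final_eq (halfs : Int) (h0 : 0 ≤ halfs) (a : List Int) (best : Int)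
    (ch : PySem.Dict Int (List Int)) (hinv : ChainInv halfs a best ch) :
    halfsumWhile a (halfs + 1).toNat (halfs - best) [] =
      ((PySem.Dict.get? ch ((PySem.List.max? (PySem.Dict.keys ch) (fun x => x)).getD 0)).getD []).reverse := by
  obtain ⟨hlen, ha0, hval, hget0, hdom, hchain, hnd, hbest⟩ := hinv
  have h0mem : (0 : Int) ∈ PySem.Dict.keys ch := by
    rw [← PySem.Dict.contains_iff_mem_keys]
    exact (hdom 0).mpr (Or.inl rfl)
  obtain ⟨k, hk⟩ : ∃ k, PySem.List.max? (PySem.Dict.keys ch) (fun x => x) = some k := by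
    cases hmx : PySem.List.max? (PySem.Dict.keys ch) (fun x => x) with
    | none =>
      rw [PySem.List.max?_eq_none_iff] at hmx
      rw [hmx] at h0mem
      simp at h0mem
    | some k => exact ⟨k, rfl⟩
  have hk1 := PySem.List.max?_mem hk
  have hk2 : (0 : Int) ≤ k := PySem.List.max?_isMax hk 0 h0mem
  rcases hbest with ⟨hb1, hb⟩ | ⟨m, hm, hm0, hbe, hub⟩
  · have hmax : (PySem.List.max? (PySem.Dict.keys ch) (fun x => x)).getD 0 = 0 := by
      have := hb k hk1
      rw [hk]
      simp
      omega
    rw [hmax, hget0, hb1, whileA_nonpos _ _ _ _ (by omega)]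
    rfl
  · have hkm' : k ≤ m := hub k hk1
    have hmk : m ≤ k := PySem.List.max?_isMax hk m hm
    have hmax : (PySem.List.max? (PySem.Dict.keys ch) (fun x => x)).getD 0 = m := by
      rw [hk]
      simp
      omega
    have hmh : m ≤ halfs := by
      have hcm : PySem.Dict.contains ch m = true := by
        rw [PySem.Dict.contains_iff_mem_keys]; exact hm
      rcases (hdom m).mp hcm with he | ⟨_, hh, _⟩
      · omega
      · exact hh
    obtain ⟨c, hc⟩ : ∃ c, ch.get? m = some c := by
      have hcm : PySem.Dict.contains ch m = true := by
        rw [PySem.Dict.contains_iff_mem_keys]; exact hm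
      cases hg : ch.get? m with
      | none =>
        exfalso
        rw [PySem.Dict.get?_eq_none_iff_contains] at hg
        rw [hcm] at hg
        simp at hg
      | some c => exact ⟨c, rfl⟩
    rw [hmax, hbe, show halfs - (halfs - m) = m by ring,
      while_peel halfs a best ch ⟨hlen, ha0, hval, hget0, hdom, hchain, hnd,
        Or.inr ⟨m, hm, hm0, hbe, hub⟩⟩ (halfs + 1).toNat m c [] (by omega) hmh (by omega) hc,
      hc]
    rfl

-- ===== VERDICT (by name: the statement is the Claim_ definition above) =====
theorem halfsum_spec : Claim_equal_halfsum := by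
  intro lst halfs _ hpre
  obtain ⟨h0, hall⟩ := hpre
  unfold Spec_halfsum halfsum halfsum_alt
  exact final_eq halfs h0 _ _ _ (fold_inv halfs lst _ _ _ hall (init_inv halfs h0))
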